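-- pv_equiv track=rewrite | github.com/perezjuang1/forex2025 | TradingVisualizer.py | create_continuous_zones
-- ===== SOURCE A (Python) =====
-- def create_continuous_zones(indices):
--     """Create continuous zones from individual indices"""
--     if not indices:
--         return []
--
--     zones = []
--     start = indices[0]
--     end = indices[0]
--
--     for i in range(1, len(indices)):
--         if indices[i] == indices[i-1] + 1:
--             # Continuous
--             end = indices[i]
--         else:
--             # Gap found, save current zone
--             zones.append((start, end))
--             start = indices[i]
--             end = indices[i]
--
--     # Add last zone
--     zones.append((start, end))
--     return zones
-- ===== SOURCE B (Python) =====
-- def create_continuous_zones(indices):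
--     """Create continuous zones from individual indices"""
--     rev = []
--     for x in reversed(indices):
--         if rev and rev[-1][0] == x + 1:
--             # x extends the last-built (leftmost) zone downward
--             rev[-1] = (x, rev[-1][1])
--         else:
--             rev.append((x, x))
--     rev.reverse()
--     return rev
-- ===== Notes on version B (the rewrite author's own statement) =====
-- stated objective: alternative
-- what changed: Replaces A's left-to-right start/end state machine with a back-to-front build: traverse the list reversed with no scalar run state, merging each element into the last-built zone of the output (extend it downward if it starts at x+1, else open a fresh singleton zone), then reverse the zone list once.
import Mathlib
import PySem

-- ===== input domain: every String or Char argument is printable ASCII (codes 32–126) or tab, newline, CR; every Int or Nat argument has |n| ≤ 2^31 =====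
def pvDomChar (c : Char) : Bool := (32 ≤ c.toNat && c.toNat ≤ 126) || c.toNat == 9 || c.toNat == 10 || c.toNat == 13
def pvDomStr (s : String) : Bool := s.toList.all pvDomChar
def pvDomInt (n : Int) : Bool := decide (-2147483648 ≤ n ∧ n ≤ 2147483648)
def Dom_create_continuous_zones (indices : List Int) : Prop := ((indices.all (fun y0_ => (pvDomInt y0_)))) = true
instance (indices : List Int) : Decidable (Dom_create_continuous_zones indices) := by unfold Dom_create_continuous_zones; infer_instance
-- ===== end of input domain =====

-- B replaces A's left-to-right start/end state machine with a back-to-front build: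
-- traverse reversed, merging each element into the last-built zone of the output,
-- then reverse the zone list once; alternative structure, same results.


-- ===== PORT A =====
-- A's for-loop over i in range(1, len(indices)) compares indices[i] with indices[i-1]
-- and carries (zones, start, end); ported as the obvious structural recursion over the
-- tail with `prev` = indices[i-1] and the same (zones, start, end) state.
def aLoop (prev : Int) (rest : List Int) (zones : List (Int × Int)) (start end_ : Int) :
    List (Int × Int) :=
  match rest with
  | [] => zones ++ [(start, end_)]
  | x :: xs =>
    if x = prev + 1 then
      aLoop x xs zones start x
    else
      aLoop x xs (zones ++ [(start, end_)]) x x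

def create_continuous_zones (indices : List Int) : List (Int × Int) :=
  match indices with
  | [] => []
  | x :: xs => aLoop x xs [] x x

-- ===== PORT B =====
-- Source B's loop body: `rev[-1]` is the last element (getLast?), updating it in place is
-- dropLast ++ [new], `rev.append` is concatenation at the end.
def bStep (rev : List (Int × Int)) (x : Int) : List (Int × Int) :=
  match rev.getLast? with
  | some (a, b) => if a = x + 1 then rev.dropLast ++ [(x, b)] else rev ++ [(x, x)]
  | none => [(x, x)]

-- Source B: 'for x in reversed(indices)' threading `rev`, then `rev.reverse()`.
def create_continuous_zones_alt (indices : List Int) : List (Int × Int) :=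
  (indices.reverse.foldl bStep []).reverse

-- ===== PRECONDITION & SPEC =====
def Spec_create_continuous_zones (indices : List Int) (out : List (Int × Int)) : Prop := out = create_continuous_zones_alt indices
instance (indices : List Int) (out : List (Int × Int)) : Decidable (Spec_create_continuous_zones indices out) := by unfold Spec_create_continuous_zones; infer_instance

-- ===== CLAIM (what is proved, stated in full; the proofs are below) =====
def Claim_equal_create_continuous_zones : Prop := ∀ (indices : List Int), Dom_create_continuous_zones indices → Spec_create_continuous_zones indices (create_continuous_zones indices)

-- ===== LEMMAS AND PROOFS =====

-- Characterisation of A's loop: zones of `rest` with an open zone (start, prev).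
def zonesFrom (start prev : Int) (rest : List Int) : List (Int × Int) :=
  match rest with
  | [] => [(start, prev)]
  | x :: xs =>
    if x = prev + 1 then zonesFrom start x xs
    else (start, prev) :: zonesFrom x x xs

-- end of the first (open) zone
def fe (p : Int) (l : List Int) : Int :=
  match l with
  | [] => p
  | x :: xs => if x = p + 1 then fe x xs else p

-- zones strictly after the first one
def tzs (p : Int) (l : List Int) : List (Int × Int) :=
  match l with
  | [] => []
  | x :: xs => if x = p + 1 then tzs x xs else (x, fe x xs) :: tzs x xs

theorem zonesFrom_eq (l : List Int) (s p : Int) :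
    zonesFrom s p l = (s, fe p l) :: tzs p l := by
  induction l generalizing s p with
  | nil => simp [zonesFrom, fe, tzs]
  | cons x xs ih =>
    simp only [zonesFrom, fe, tzs]
    split
    · exact ih s x
    · rw [ih x x]

theorem aLoop_eq_zonesFrom (rest : List Int) (prev : Int) (zones : List (Int × Int))
    (start : Int) : aLoop prev rest zones start prev = zones ++ zonesFrom start prev rest := by
  induction rest generalizing prev zones start with
  | nil => simp [aLoop, zonesFrom]
  | cons x xs ih =>
    simp only [aLoop, zonesFrom]
    split
    · exact ih x zones start
    · rw [ih x (zones ++ [(start, prev)]) x]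
      simp

theorem a_cons_eq (x : Int) (xs : List Int) :
    create_continuous_zones (x :: xs) = (x, fe x xs) :: tzs x xs := by
  rw [create_continuous_zones, aLoop_eq_zonesFrom, zonesFrom_eq]
  simp

-- head-side mirror of bStep, used only to reason about the right fold
def mergeFront (x : Int) (zones : List (Int × Int)) : List (Int × Int) :=
  match zones with
  | (a, b) :: rest => if a = x + 1 then (x, b) :: rest else (x, x) :: (a, b) :: rest
  | [] => [(x, x)]

theorem bStep_rev (zs : List (Int × Int)) (x : Int) :
    bStep zs.reverse x = (mergeFront x zs).reverse := by
  cases zs with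
  | nil => simp [bStep, mergeFront]
  | cons hd t =>
    obtain ⟨a, b⟩ := hd
    simp only [bStep, mergeFront, List.reverse_cons, List.getLast?_append,
      List.getLast?_singleton, Option.some_or]
    split <;> simp

theorem foldl_rev_eq (l : List Int) :
    l.reverse.foldl bStep [] = (l.foldr mergeFront []).reverse := by
  rw [List.foldl_reverse]
  induction l with
  | nil => rfl
  | cons x xs ih =>
    simp only [List.foldr_cons]
    rw [ih, bStep_rev]

theorem a_eq_merge (indices : List Int) :
    create_continuous_zones indices = indices.foldr mergeFront [] := by
  induction indices with
  | nil => rfl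
  | cons x xs ih =>
    rw [a_cons_eq]
    show _ = mergeFront x (xs.foldr mergeFront [])
    rw [← ih]
    cases xs with
    | nil => simp [create_continuous_zones, mergeFront, fe, tzs]
    | cons y ys =>
      rw [a_cons_eq]
      simp only [mergeFront, fe, tzs]
      split
      · simp_all
      · simp_all

theorem a_eq_b (indices : List Int) :
    create_continuous_zones indices = create_continuous_zones_alt indices := by
  rw [create_continuous_zones_alt, foldl_rev_eq, List.reverse_reverse, a_eq_merge]

-- ===== VERDICT (by name: the statement is the Claim_ definition above) =====
theorem create_continuous_zones_spec : Claim_equal_create_continuous_zones := by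
  intro indices _
  exact a_eq_b indices
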